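-- pv_equiv track=rewrite | github.com/shanjays/vllm_server_param_tuner_sensors | config_exporter.py | _find_nearest_config
-- ===== SOURCE A (Python) =====
-- def _find_nearest_config(target, tested_counts):
--     """
--     Find nearest tested token count for interpolation.
--
--     Strategy:
--     - For targets beyond tested range: use nearest boundary
--     - For targets within range: use nearest tested count, with tie-breaker
--       preferring the lower count for safety (proven configs work)
--
--     Args:
--         target: Target token count to find config for
--         tested_counts: List of token counts that have been tested
--
--     Returns:
--         int: Nearest tested token count
--     """
--     if not tested_counts:
--         return 1  # Fallback to smallest
--
--     # Handle boundary cases first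
--     if target > max(tested_counts):
--         return max(tested_counts)
--     elif target < min(tested_counts):
--         return min(tested_counts)
--
--     # Find bracketing values for targets within range
--     lower = max([c for c in tested_counts if c <= target], default=min(tested_counts))
--     upper = min([c for c in tested_counts if c >= target], default=max(tested_counts))
--
--     # Prefer lower for safety when equidistant (proven configs work)
--     return lower if (target - lower) <= (upper - target) else upper
-- ===== SOURCE B (Python) =====
-- def _find_nearest_config(target, tested_counts):
--     if not tested_counts:
--         return 1  # Fallback to smallest
--     # Single pass: globally nearest tested count, ties broken toward the lower count.
--     return min(tested_counts, key=lambda c: (abs(c - target), c))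
-- ===== Notes on version B (the rewrite author's own statement) =====
-- stated objective: simpler
-- what changed: Replaces A's boundary checks plus two filtered comprehensions with max/min (five passes) by a single argmin pass keyed by (abs(c-target), c), whose secondary key encodes the prefer-lower tie-break.
import Mathlib
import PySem

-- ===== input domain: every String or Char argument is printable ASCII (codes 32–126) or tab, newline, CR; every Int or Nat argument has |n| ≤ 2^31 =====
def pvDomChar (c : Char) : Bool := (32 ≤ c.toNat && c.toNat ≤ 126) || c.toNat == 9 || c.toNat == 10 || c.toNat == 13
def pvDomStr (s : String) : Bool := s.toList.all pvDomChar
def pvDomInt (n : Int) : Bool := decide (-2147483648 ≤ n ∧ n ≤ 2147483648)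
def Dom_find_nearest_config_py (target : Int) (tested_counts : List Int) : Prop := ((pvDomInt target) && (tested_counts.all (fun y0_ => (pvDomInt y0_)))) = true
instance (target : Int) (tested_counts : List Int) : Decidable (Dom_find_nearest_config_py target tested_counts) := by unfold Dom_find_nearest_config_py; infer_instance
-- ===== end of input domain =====

-- B differs from A only in structure (one argmin pass instead of boundary checks plus
-- filtered max/min passes); the proof shows the return values agree on every input.

-- ===== PORT A =====
-- Python max(xs)/min(xs) on a nonempty list is the running max/min fold
-- (PySem.List.max?_id_cons / min?_id_cons); max(..., default=d) is PySem.List.maxD.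
def find_nearest_config_py (target : Int) (tested_counts : List Int) : Int :=
  match tested_counts with
  | [] => 1  -- Fallback to smallest
  | x :: t =>
    if target > t.foldl max x then t.foldl max x
    else if target < t.foldl min x then t.foldl min x
    else
      let lower := PySem.List.maxD ((x :: t).filter (fun c => decide (c ≤ target))) (fun c => c) (t.foldl min x)
      let upper := PySem.List.minD ((x :: t).filter (fun c => decide (target ≤ c))) (fun c => c) (t.foldl max x)
      if target - lower ≤ upper - target then lower else upper

-- ===== PORT B =====
def find_nearest_config_py_alt (target : Int) (tested_counts : List Int) : Int :=
  if tested_counts = [] then 1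
  else (PySem.List.min2? tested_counts (fun c => |c - target|) (fun c => c)).getD 1

-- ===== PRECONDITION & SPEC =====
def Spec_find_nearest_config_py (target : Int) (tested_counts : List Int) (out : Int) : Prop := out = find_nearest_config_py_alt target tested_counts
instance (target : Int) (tested_counts : List Int) (out : Int) : Decidable (Spec_find_nearest_config_py target tested_counts out) := by unfold Spec_find_nearest_config_py; infer_instance

-- ===== CLAIM (what is proved, stated in full; the proofs are below) =====
def Claim_equal_find_nearest_config_py : Prop := ∀ (target : Int) (tested_counts : List Int), Dom_find_nearest_config_py target tested_counts → Spec_find_nearest_config_py target tested_counts (find_nearest_config_py target tested_counts)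

-- ===== LEMMAS AND PROOFS =====

-- "m is the nearest-with-lower-tie-break element": m is in the list and beats every
-- element lexicographically on the key (|c - target|, c).
def pvGood (target m : Int) (xs : List Int) : Prop :=
  m ∈ xs ∧ ∀ y ∈ xs, |m - target| < |y - target| ∨ (|m - target| = |y - target| ∧ m ≤ y)

theorem pvGood_unique {target m m' : Int} {xs : List Int}
    (h : pvGood target m xs) (h' : pvGood target m' xs) : m = m' := by
  rcases h with ⟨hm, hb⟩
  rcases h' with ⟨hm', hb'⟩
  have h1 := hb m' hm'
  have h2 := hb' m hm
  simp only [Int.abs_eq_natAbs] at h1 h2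
  omega

-- min2? lacks spec lemmas in the prelude, so we characterise its fold directly
-- for our concrete keys.
def pvStep (target : Int) (acc : Option Int) (x : Int) : Option Int :=
  match acc with
  | none => some x
  | some m =>
    if (decide (|x - target| < |m - target|) ||
        !decide (|m - target| < |x - target|) && decide (x < m)) = true
    then some x else some m
theorem pvMin2_foldl (target : Int) (t : List Int) (m : Int) :
    ∃ r, t.foldl (pvStep target) (some m) = some r ∧
      (r = m ∨ r ∈ t) ∧
      (|r - target| < |m - target| ∨ (|r - target| = |m - target| ∧ r ≤ m)) ∧
      ∀ y ∈ t, |r - target| < |y - target| ∨ (|r - target| = |y - target| ∧ r ≤ y) := by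
  induction t generalizing m with
  | nil =>
    exact ⟨m, rfl, Or.inl rfl, Or.inr ⟨rfl, le_refl m⟩, by simp⟩
  | cons x t ih =>
    simp only [List.foldl_cons, pvStep]
    by_cases hc : (decide (|x - target| < |m - target|) ||
        !decide (|m - target| < |x - target|) && decide (x < m)) = true
    · simp only [hc, if_true]
      obtain ⟨r, hr, hmem, hbm, hball⟩ := ih x
      refine ⟨r, hr, ?_, ?_, ?_⟩
      · rcases hmem with h | h
        · exact Or.inr (by simp [h])
        · exact Or.inr (by simp [h])
      · simp only [Bool.or_eq_true, Bool.and_eq_true, Bool.not_eq_true',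
          decide_eq_true_eq, decide_eq_false_iff_not] at hc
        simp only [Int.abs_eq_natAbs] at hbm hc ⊢
        omega
      · intro y hy
        rcases List.mem_cons.mp hy with h | h
        · subst h; exact hbm
        · exact hball y h
    · simp only [hc]
      obtain ⟨r, hr, hmem, hbm, hball⟩ := ih m
      refine ⟨r, hr, ?_, hbm, ?_⟩
      · rcases hmem with h | h
        · exact Or.inl h
        · exact Or.inr (by simp [h])
      · intro y hy
        rcases List.mem_cons.mp hy with h | h
        · subst h
          simp only [Bool.or_eq_true, Bool.and_eq_true, Bool.not_eq_true',
            decide_eq_true_eq, decide_eq_false_iff_not] at hc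
          simp only [Int.abs_eq_natAbs] at hbm hc ⊢
          omega
        · exact hball y h

theorem pvAlt_good (target x : Int) (t : List Int) :
    pvGood target (find_nearest_config_py_alt target (x :: t)) (x :: t) := by
  unfold find_nearest_config_py_alt
  simp only [List.cons_ne_nil, if_false]
  obtain ⟨r, hr, hmem, hbm, hball⟩ := pvMin2_foldl target t x
  have hfold : PySem.List.min2? (x :: t) (fun c => |c - target|) (fun c => c) = some r := by
    have hsame : PySem.List.min2? (x :: t) (fun c => |c - target|) (fun c => c)
        = t.foldl (pvStep target) (some x) := by
      simp only [PySem.List.min2?, List.foldl_cons]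
      congr 1
      funext acc y
      cases acc <;> rfl
    rw [hsame, hr]
  rw [hfold]
  refine ⟨?_, ?_⟩
  · rcases hmem with h | h
    · simp [h]
    · simp [h]
  · intro y hy
    rcases List.mem_cons.mp hy with h | h
    · subst h; exact hbm
    · exact hball y h

theorem pvA_good (target x : Int) (t : List Int) :
    pvGood target (find_nearest_config_py target (x :: t)) (x :: t) := by
  unfold find_nearest_config_py
  have hmaxmem : t.foldl max x ∈ x :: t := by
    rcases PySem.List.foldl_max_mem t x with h | h
    · simp [h]
    · simp [h]
  have hminmem : t.foldl min x ∈ x :: t := by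
    rcases PySem.List.foldl_min_mem t x with h | h
    · simp [h]
    · simp [h]
  have hmax := PySem.List.le_foldl_max t x
  have hmin := PySem.List.foldl_min_le t x
  by_cases h1 : target > t.foldl max x
  · simp only [h1, if_true]
    refine ⟨hmaxmem, ?_⟩
    intro y hy
    have hyle : y ≤ t.foldl max x := by
      rcases List.mem_cons.mp hy with h | h
      · subst h; exact hmax.1
      · exact hmax.2 y h
    simp only [Int.abs_eq_natAbs]; omega
  · simp only [h1, if_false]
    by_cases h2 : target < t.foldl min x
    · simp only [h2, if_true]
      refine ⟨hminmem, ?_⟩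
      intro y hy
      have hyle : t.foldl min x ≤ y := by
        rcases List.mem_cons.mp hy with h | h
        · subst h; exact hmin.1
        · exact hmin.2 y h
      simp only [Int.abs_eq_natAbs]; omega
    · simp only [h2, if_false]
      push Not at h1 h2
      -- target is within [min, max]; both filtered lists are nonempty
      set lo := PySem.List.maxD ((x :: t).filter (fun c => decide (c ≤ target))) (fun c => c) (t.foldl min x) with hlo
      set hi := PySem.List.minD ((x :: t).filter (fun c => decide (target ≤ c))) (fun c => c) (t.foldl max x) with hhi
      have hlne : (x :: t).filter (fun c => decide (c ≤ target)) ≠ [] := by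
        have : t.foldl min x ∈ (x :: t).filter (fun c => decide (c ≤ target)) := by
          rw [List.mem_filter]; exact ⟨hminmem, by simpa using h2⟩
        exact List.ne_nil_of_mem this
      have hhne : (x :: t).filter (fun c => decide (target ≤ c)) ≠ [] := by
        have : t.foldl max x ∈ (x :: t).filter (fun c => decide (target ≤ c)) := by
          rw [List.mem_filter]; exact ⟨hmaxmem, by simpa using h1⟩
        exact List.ne_nil_of_mem this
      have hlomem' := PySem.List.maxD_mem _ (fun c : Int => c) (t.foldl min x) hlne
      have hhimem' := PySem.List.minD_mem _ (fun c : Int => c) (t.foldl max x) hhne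
      rw [← hlo] at hlomem'
      rw [← hhi] at hhimem'
      have hlomem : lo ∈ x :: t := (List.mem_filter.mp hlomem').1
      have hloT : lo ≤ target := by simpa using (List.mem_filter.mp hlomem').2
      have hhimem : hi ∈ x :: t := (List.mem_filter.mp hhimem').1
      have hhiT : target ≤ hi := by simpa using (List.mem_filter.mp hhimem').2
      have hloMax : ∀ y ∈ x :: t, y ≤ target → y ≤ lo := by
        intro y hy hyt
        have : y ∈ (x :: t).filter (fun c => decide (c ≤ target)) := by
          rw [List.mem_filter]; exact ⟨hy, by simpa using hyt⟩
        have := PySem.List.le_key_maxD _ (fun c : Int => c) (t.foldl min x) hlne y this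
        rw [← hlo] at this; exact this
      have hhiMin : ∀ y ∈ x :: t, target ≤ y → hi ≤ y := by
        intro y hy hyt
        have : y ∈ (x :: t).filter (fun c => decide (target ≤ c)) := by
          rw [List.mem_filter]; exact ⟨hy, by simpa using hyt⟩
        have := PySem.List.key_minD_le _ (fun c : Int => c) (t.foldl max x) hhne y this
        rw [← hhi] at this; exact this
      by_cases h3 : target - lo ≤ hi - target
      · simp only [h3, if_true]
        refine ⟨hlomem, ?_⟩
        intro y hy
        by_cases hyt : y ≤ target
        · have := hloMax y hy hyt
          simp only [Int.abs_eq_natAbs]; omega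
        · push Not at hyt
          have := hhiMin y hy (le_of_lt hyt)
          simp only [Int.abs_eq_natAbs]; omega
      · simp only [h3, if_false]
        push Not at h3
        refine ⟨hhimem, ?_⟩
        intro y hy
        by_cases hyt : y ≤ target
        · have := hloMax y hy hyt
          simp only [Int.abs_eq_natAbs]; omega
        · push Not at hyt
          have := hhiMin y hy (le_of_lt hyt)
          simp only [Int.abs_eq_natAbs]; omega

-- ===== VERDICT (by name: the statement is the Claim_ definition above) =====
theorem find_nearest_config_py_spec : Claim_equal_find_nearest_config_py := by
  intro target tested_counts _
  unfold Spec_find_nearest_config_py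
  match tested_counts with
  | [] => rfl
  | x :: t => exact pvGood_unique (pvA_good target x t) (pvAlt_good target x t)
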